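-- pv_equiv track=rewrite | github.com/Sayantan-coder/Edabith-Hard-level | TallestSkyscraper.py | get_tallest_skyscraper
-- ===== SOURCE A (Python) =====
-- def get_tallest_skyscraper(matrix: list) -> int:
--     height_tallest_skyscraper = 0
--
--     number_columns = len(matrix[0])
--     for col in range(number_columns):
--         count = 0
--         for row in range(len(matrix)):
--             if matrix[row][col] == 1:
--                 count += 1
--             if count > height_tallest_skyscraper:
--                 height_tallest_skyscraper = count
--     return height_tallest_skyscraper
-- ===== SOURCE B (Python) =====
-- def get_tallest_skyscraper(matrix: list) -> int:
--     number_columns = len(matrix[0])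
--     counts = [0] * number_columns
--     for row in matrix:
--         counts = [counts[col] + (1 if row[col] == 1 else 0) for col in range(number_columns)]
--     return max(counts) if counts else 0
-- ===== Notes on version B (the rewrite author's own statement) =====
-- stated objective: alternative
-- what changed: B replaces A's column-major double loop with a running maximum by a single row-major pass maintaining a per-column count vector, taking the maximum of the counts at the end.
import Mathlib
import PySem

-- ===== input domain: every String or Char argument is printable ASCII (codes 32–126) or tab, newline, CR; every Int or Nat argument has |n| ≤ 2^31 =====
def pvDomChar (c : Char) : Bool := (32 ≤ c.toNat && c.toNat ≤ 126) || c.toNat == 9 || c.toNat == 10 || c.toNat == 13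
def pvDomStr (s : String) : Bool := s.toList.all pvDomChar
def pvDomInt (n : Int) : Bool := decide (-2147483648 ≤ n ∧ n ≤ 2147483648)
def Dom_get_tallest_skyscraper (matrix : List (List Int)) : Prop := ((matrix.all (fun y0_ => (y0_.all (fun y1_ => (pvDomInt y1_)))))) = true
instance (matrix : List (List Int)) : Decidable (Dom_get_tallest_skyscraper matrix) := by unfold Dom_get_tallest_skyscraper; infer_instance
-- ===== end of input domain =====

-- B: one row-major pass maintaining a per-column count vector instead of A's
-- column-major double loop with a running maximum (objective: alternative; same cost).

-- ===== PORT A =====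
-- A: column-major; for each column, count 1s over all rows, tracking the running max.
def get_tallest_skyscraper (matrix : List (List Int)) : Int :=
  let number_columns := ((PySem.List.pyGet? matrix 0).getD []).length
  (List.range number_columns).foldl
    (fun (height : Int) (col : Nat) =>
      ((List.range matrix.length).foldl
        (fun (st : Int × Int) (row : Nat) =>
          let count :=
            if PySem.List.pyGetD (PySem.List.pyGetD matrix (row : Int) []) (col : Int) 0 = 1
            then st.1 + 1 else st.1
          (count, if st.2 < count then count else st.2))
        (0, height)).2)
    0

-- ===== PORT B =====
-- B: row-major; counts[col] accumulates the 1s of column col; answer = max(counts) (0 if no columns).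
def get_tallest_skyscraper_alt (matrix : List (List Int)) : Int :=
  let number_columns := ((PySem.List.pyGet? matrix 0).getD []).length
  let counts := matrix.foldl
    (fun (counts : List Int) row =>
      (List.range number_columns).map
        (fun (col : Nat) =>
          PySem.List.pyGetD counts (col : Int) 0 +
            (if PySem.List.pyGetD row (col : Int) 0 = 1 then 1 else 0)))
    (List.replicate number_columns 0)
  if counts.isEmpty then 0 else (PySem.List.max? counts (fun y => y)).getD 0

-- ===== PRECONDITION & SPEC =====
-- Pre_ excludes exactly the inputs where Python A raises an IndexError: the empty
-- matrix (matrix[0]) and ragged matrices with a row shorter than the first row.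
def Pre_get_tallest_skyscraper (matrix : List (List Int)) : Prop :=
  matrix ≠ [] ∧ ∀ row ∈ matrix, (matrix.headD []).length ≤ row.length
instance (matrix : List (List Int)) : Decidable (Pre_get_tallest_skyscraper matrix) := by
  unfold Pre_get_tallest_skyscraper; infer_instance
def pvWitness_get_tallest_skyscraper : List (List Int) := [[1, 0], [1, 1]]

def Spec_get_tallest_skyscraper (matrix : List (List Int)) (out : Int) : Prop := out = get_tallest_skyscraper_alt matrix
instance (matrix : List (List Int)) (out : Int) : Decidable (Spec_get_tallest_skyscraper matrix out) := by unfold Spec_get_tallest_skyscraper; infer_instance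

-- ===== CLAIM (what is proved, stated in full; the proofs are below) =====
def Claim_equal_get_tallest_skyscraper : Prop := ∀ (matrix : List (List Int)), Dom_get_tallest_skyscraper matrix → Pre_get_tallest_skyscraper matrix → Spec_get_tallest_skyscraper matrix (get_tallest_skyscraper matrix)

-- ===== LEMMAS AND PROOFS =====

-- number of 1s in column `col` of `m` (Python's `== 1` test; default 0 out of range)
def pvCnt : List (List Int) → Nat → Int
  | [], _ => 0
  | row :: rs, col => (if row.getD col 0 = 1 then 1 else 0) + pvCnt rs col

lemma pvCnt_nonneg (m : List (List Int)) (col : Nat) : 0 ≤ pvCnt m col := by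
  induction m with
  | nil => simp [pvCnt]
  | cons r rs ih => simp only [pvCnt]; split <;> omega

-- a fold over range(len xs) reading xs.getD is a fold over xs
lemma pv_foldl_range_getD {α β : Type} (d : α) (f : β → α → β) :
    ∀ (xs : List α) (init : β),
      (List.range xs.length).foldl (fun b i => f b (xs.getD i d)) init = xs.foldl f init := by
  intro xs
  induction xs with
  | nil => intro init; simp
  | cons x t ih =>
    intro init
    simp only [List.length_cons, List.range_succ_eq_map, List.foldl_cons, List.foldl_map,
      List.getD_cons_zero, List.getD_cons_succ]
    exact ih (f init x)

-- A's inner loop: running count with running max (invariant: count ≤ height)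
lemma pv_innerA (col : Nat) :
    ∀ (rows : List (List Int)) (c h : Int), c ≤ h →
      rows.foldl
        (fun (st : Int × Int) row =>
          (if row.getD col 0 = 1 then st.1 + 1 else st.1,
            if st.2 < (if row.getD col 0 = 1 then st.1 + 1 else st.1)
            then (if row.getD col 0 = 1 then st.1 + 1 else st.1) else st.2))
        (c, h)
      = (c + pvCnt rows col, max h (c + pvCnt rows col)) := by
  intro rows
  induction rows with
  | nil =>
    intro c h hch
    simp only [List.foldl_nil, pvCnt, Prod.mk.injEq]
    omega
  | cons r rs ih =>
    intro c h hch
    have hnn := pvCnt_nonneg rs col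
    simp only [List.foldl_cons, pvCnt]
    by_cases hr : r.getD col 0 = 1
    · simp only [hr, if_true]
      rw [ih (c + 1) (if h < c + 1 then c + 1 else h) (by split <;> omega)]
      simp only [Prod.mk.injEq]
      refine ⟨by ring, ?_⟩
      split_ifs <;> omega
    · simp only [hr, if_false]
      rw [ih c (if h < c then c else h) (by split <;> omega)]
      simp only [Prod.mk.injEq]
      refine ⟨by ring, ?_⟩
      split_ifs <;> omega

-- one column of A's outer loop equals max with the column count
lemma pv_colstep (matrix : List (List Int)) (c : Nat) (h : Int) (h0 : 0 ≤ h) :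
    ((List.range matrix.length).foldl
      (fun (st : Int × Int) (row : Nat) =>
        (if PySem.List.pyGetD (PySem.List.pyGetD matrix (row : Int) []) (c : Int) 0 = 1
           then st.1 + 1 else st.1,
          if st.2 < (if PySem.List.pyGetD (PySem.List.pyGetD matrix (row : Int) []) (c : Int) 0 = 1
              then st.1 + 1 else st.1)
          then (if PySem.List.pyGetD (PySem.List.pyGetD matrix (row : Int) []) (c : Int) 0 = 1
              then st.1 + 1 else st.1)
          else st.2))
      (0, h)).2 = max h (pvCnt matrix c) := by
  simp only [PySem.List.pyGetD_natCast]
  rw [pv_foldl_range_getD ([] : List Int)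
    (fun (st : Int × Int) (row : List Int) =>
      (if row.getD c 0 = 1 then st.1 + 1 else st.1,
        if st.2 < (if row.getD c 0 = 1 then st.1 + 1 else st.1)
        then (if row.getD c 0 = 1 then st.1 + 1 else st.1) else st.2)) matrix (0, h)]
  rw [pv_innerA c matrix 0 h h0]
  simp

lemma pv_A_eq (matrix : List (List Int)) :
    get_tallest_skyscraper matrix =
      (List.range ((PySem.List.pyGet? matrix 0).getD []).length).foldl
        (fun h col => max h (pvCnt matrix col)) 0 := by
  simp only [get_tallest_skyscraper]
  have main : ∀ (cols : List Nat) (h : Int), 0 ≤ h →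
      cols.foldl
        (fun (height : Int) (col : Nat) =>
          ((List.range matrix.length).foldl
            (fun (st : Int × Int) (row : Nat) =>
              let count :=
                if PySem.List.pyGetD (PySem.List.pyGetD matrix (row : Int) []) (col : Int) 0 = 1
                then st.1 + 1 else st.1
              (count, if st.2 < count then count else st.2))
            (0, height)).2) h
      = cols.foldl (fun height col => max height (pvCnt matrix col)) h := by
    intro cols
    induction cols with
    | nil => intro h _; rfl
    | cons c cs ih =>
      intro h h0
      simp only [List.foldl_cons]
      rw [pv_colstep matrix c h h0]
      exact ih (max h (pvCnt matrix c)) (le_trans h0 (le_max_left h (pvCnt matrix c)))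
  exact main _ 0 (le_refl 0)

-- B's row loop keeps counts = [f col + pvCnt (processed rows) col for col in range n]
lemma pv_rowsB (n : Nat) :
    ∀ (m : List (List Int)) (f : Nat → Int),
      m.foldl
        (fun (counts : List Int) row =>
          (List.range n).map
            (fun col => counts.getD col 0 + (if row.getD col 0 = 1 then 1 else 0)))
        ((List.range n).map f)
      = (List.range n).map (fun col => f col + pvCnt m col) := by
  intro m
  induction m with
  | nil => intro f; simp [pvCnt]
  | cons r rs ih =>
    intro f
    simp only [List.foldl_cons]
    have h1 : (List.range n).map
        (fun col => ((List.range n).map f).getD col 0 + (if r.getD col 0 = 1 then 1 else 0))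
        = (List.range n).map (fun col => f col + (if r.getD col 0 = 1 then 1 else 0)) := by
      apply List.map_congr_left
      intro col hcol
      have hc : col < n := List.mem_range.mp hcol
      have hg : ((List.range n).map f).getD col 0 = f col := by
        rw [List.getD_eq_getElem _ _ (by simpa using hc)]
        simp
      rw [hg]
    rw [h1, ih (fun col => f col + (if r.getD col 0 = 1 then 1 else 0))]
    apply List.map_congr_left
    intro col _
    simp only [pvCnt]
    ring

-- Python's `max(l) if l else 0` is the running max from 0 when l has no negatives
lemma pv_maxOf (l : List Int) (hl : ∀ x ∈ l, 0 ≤ x) :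
    (if l.isEmpty then 0 else (PySem.List.max? l (fun y => y)).getD 0)
      = l.foldl (fun a b => max a b) 0 := by
  cases l with
  | nil => simp
  | cons x t =>
    have hx : (0 : Int) ≤ x := hl x (by simp)
    rw [PySem.List.max?_id_cons]
    simp only [List.isEmpty_cons, Bool.false_eq_true, if_false, Option.getD_some, List.foldl_cons]
    have hm : max (0 : Int) x = x := by omega
    rw [hm]

-- ===== VERDICT (by name: the statement is the Claim_ definition above) =====
theorem get_tallest_skyscraper_spec : Claim_equal_get_tallest_skyscraper := by
  intro matrix _ _
  unfold Spec_get_tallest_skyscraper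
  rw [pv_A_eq]
  simp only [get_tallest_skyscraper_alt, PySem.List.pyGetD_natCast]
  have hrep : (List.replicate ((PySem.List.pyGet? matrix 0).getD []).length (0 : Int))
      = (List.range ((PySem.List.pyGet? matrix 0).getD []).length).map (fun _ => 0) := by
    simp [List.map_const']
  rw [hrep, pv_rowsB ((PySem.List.pyGet? matrix 0).getD []).length matrix (fun _ => 0)]
  have hsimp : (List.range ((PySem.List.pyGet? matrix 0).getD []).length).map
        (fun col => (0 : Int) + pvCnt matrix col)
      = (List.range ((PySem.List.pyGet? matrix 0).getD []).length).map
        (fun col => pvCnt matrix col) := by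
    simp
  rw [hsimp, pv_maxOf _ (by
    intro x hx
    obtain ⟨c, _, rfl⟩ := List.mem_map.mp hx
    exact pvCnt_nonneg matrix c)]
  rw [List.foldl_map]
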